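-- pv_equiv track=rewrite | github.com/PLSE-Lab/Python-MLAPI-expl | python_sources/covid19-ethics-exploration.py | get_string_int
-- ===== SOURCE A (Python) =====
-- def get_string_int(i):
--     i += 1
--     if i in list(range(10)):
--         return '00'+str(i)
--     if i in [i+10 for i in range(90)]:
--         return '0'+str(i)
--     if i >= 100:
--         return str(i)
-- ===== SOURCE B (Python) =====
-- def get_string_int(i):
--     i += 1
--     if i < 0:
--         return None
--     return str(i).zfill(3)
-- ===== Notes on version B (the rewrite author's own statement) =====
-- stated objective: simpler
-- what changed: Replaced the three range-membership branches (which build a 10-element list and a 90-element comprehension on every call) with a single negative guard plus str(i).zfill(3).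
import Mathlib
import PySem

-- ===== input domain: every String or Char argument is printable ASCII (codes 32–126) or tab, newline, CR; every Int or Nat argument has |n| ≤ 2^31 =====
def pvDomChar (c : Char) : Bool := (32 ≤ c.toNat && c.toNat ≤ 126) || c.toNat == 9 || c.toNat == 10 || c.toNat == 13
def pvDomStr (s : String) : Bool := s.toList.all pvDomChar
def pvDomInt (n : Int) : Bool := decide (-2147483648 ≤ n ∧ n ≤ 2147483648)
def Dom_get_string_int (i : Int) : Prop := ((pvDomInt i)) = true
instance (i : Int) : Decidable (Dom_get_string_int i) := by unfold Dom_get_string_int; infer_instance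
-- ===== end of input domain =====

-- B replaces A's three range-membership branches by one negative guard plus str(i).zfill(3) (simpler).

-- ===== PORT A =====
-- '00'+str(i) is string concatenation, ported as String.ofList of the concatenated char lists
-- (PySem.Int.toChars j = (str(j)).toList); exact for these ASCII literals.
def get_string_int (i : Int) : Option String :=
  let j := i + 1
  if j ∈ PySem.List.pyRange 0 10 1 then some (String.ofList (['0', '0'] ++ PySem.Int.toChars j))
  else if j ∈ (PySem.List.pyRange 0 90 1).map (fun k => k + 10) then
    some (String.ofList (['0'] ++ PySem.Int.toChars j))
  else if 100 ≤ j then some (PySem.Int.toStr j)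
  else none

-- ===== PORT B =====
def get_string_int_alt (i : Int) : Option String :=
  let j := i + 1
  if j < 0 then none
  else some (PySem.Str.zfill (PySem.Int.toStr j) 3)

-- ===== PRECONDITION & SPEC =====
def Spec_get_string_int (i : Int) (out : Option String) : Prop := out = get_string_int_alt i
instance (i : Int) (out : Option String) : Decidable (Spec_get_string_int i out) := by unfold Spec_get_string_int; infer_instance

-- ===== CLAIM (what is proved, stated in full; the proofs are below) =====
def Claim_equal_get_string_int : Prop := ∀ (i : Int), Dom_get_string_int i → Spec_get_string_int i (get_string_int i)

-- ===== LEMMAS AND PROOFS =====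

-- Lower bound on the digit count produced by Nat.toDigitsCore: b^k ≤ n forces at least k+1 digits.
theorem pv_toDigitsCore_len_lb (b : Nat) (hb : 2 ≤ b) :
    ∀ (k f n : Nat) (acc : List Char), n < b ^ f → b ^ k ≤ n →
      acc.length + k + 1 ≤ (Nat.toDigitsCore b f n acc).length := by
  intro k
  induction k with
  | zero =>
    intro f n acc hf hn
    induction f generalizing n acc with
    | zero => simp only [pow_zero] at hf hn; omega
    | succ f ih =>
      simp only [Nat.toDigitsCore]
      by_cases h : n / b = 0
      · simp [h]
      · simp only [h, if_false]
        have h1 : n / b < b ^ f := Nat.div_lt_of_lt_mul (by rwa [← pow_succ'] )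
        have h2 : 1 ≤ n / b := Nat.one_le_iff_ne_zero.mpr h
        have := ih (n / b) (Nat.digitChar (n % b) :: acc) h1 (by simpa using h2)
        simp at this ⊢
        omega
  | succ k ih =>
    intro f n acc hf hn
    have hbk : 0 < b ^ (k + 1) := Nat.pow_pos (by omega)
    cases f with
    | zero => simp only [pow_zero] at hf; omega
    | succ f =>
      simp only [Nat.toDigitsCore]
      have hdiv : b ^ k ≤ n / b := by
        rw [Nat.le_div_iff_mul_le (by omega)]
        calc b ^ k * b = b ^ (k + 1) := (pow_succ b k).symm
        _ ≤ n := hn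
      have h : n / b ≠ 0 := by
        have : 1 ≤ b ^ k := Nat.one_le_pow _ _ (by omega)
        omega
      simp only [h, if_false]
      have h1 : n / b < b ^ f := Nat.div_lt_of_lt_mul (by rwa [← pow_succ'])
      have := ih f (n / b) (Nat.digitChar (n % b) :: acc) h1 hdiv
      simp at this ⊢
      omega

theorem pv_toChars_len_ge_three (j : Int) (h : 100 ≤ j) : 3 ≤ (PySem.Int.toChars j).length := by
  unfold PySem.Int.toChars
  rw [if_neg (by omega)]
  have h100 : 100 ≤ j.toNat := by omega
  unfold Nat.toDigits
  have hf : j.toNat < 10 ^ (j.toNat + 1) :=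
    lt_of_lt_of_le (Nat.lt_pow_self (by omega)) (Nat.pow_le_pow_right (by omega) (by omega))
  have := pv_toDigitsCore_len_lb 10 (by omega) 2 (j.toNat + 1) j.toNat [] hf (by omega)
  simpa using this

theorem pv_zfill_of_ge (j : Int) (h : 100 ≤ j) :
    PySem.Chars.zfill (PySem.Int.toChars j) 3 = PySem.Int.toChars j := by
  unfold PySem.Chars.zfill
  rw [if_pos (by exact_mod_cast pv_toChars_len_ge_three j h)]

-- the two programs agree on every i with -1 ≤ i+1 ≤ 99 (the finite middle cases), by evaluation
set_option maxRecDepth 20000 in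
theorem pv_small_cases :
    ∀ i ∈ PySem.List.pyRange (-2) 99 1, get_string_int i = get_string_int_alt i := by
  decide

-- ===== VERDICT (by name: the statement is the Claim_ definition above) =====
theorem get_string_int_spec : Claim_equal_get_string_int := by
  intro i _
  unfold Spec_get_string_int
  by_cases hs : -2 ≤ i ∧ i < 99
  · exact pv_small_cases i (by rw [PySem.List.mem_pyRange_one]; omega)
  · simp only [get_string_int, get_string_int_alt]
    have h1 : ¬ (i + 1 ∈ PySem.List.pyRange 0 10 1) := by
      rw [PySem.List.mem_pyRange_one]; omega
    have h2 : ¬ (i + 1 ∈ (PySem.List.pyRange 0 90 1).map (fun k => k + 10)) := by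
      simp only [List.mem_map, PySem.List.mem_pyRange_one]
      rintro ⟨k, ⟨hk1, hk2⟩, hk3⟩
      omega
    by_cases hneg : i + 1 < 0
    · rw [if_neg h1, if_neg h2, if_neg (by omega : ¬ (100 ≤ i + 1)), if_pos hneg]
    · have h100 : 100 ≤ i + 1 := by omega
      rw [if_neg h1, if_neg h2, if_pos h100, if_neg (by omega : ¬ (i + 1 < 0))]
      congr 1
      rw [← String.toList_inj, PySem.Str.toList_zfill, PySem.Int.toList_toStr,
        pv_zfill_of_ge _ h100]
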